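-- pv_equiv track=rewrite | github.com/oleg121203/MVP | backend/app/compliance_management.py | _categorize_standard
-- ===== SOURCE A (Python) =====
-- def _categorize_standard(content: str) -> str:
--     """
--     Categorizes a compliance standard based on its content.
--
--     Args:
--         content (str): The content of the compliance standard.
--
--     Returns:
--         str: Determined category for the standard.
--     """
--     content_lower = content.lower()
--     if any(kw in content_lower for kw in ["safety", "hazard", "risk", "protection", "security"]):
--         return "safety_and_security"
--     elif any(kw in content_lower for kw in ["environmental", "sustainability", "emission", "waste", "pollution"]):
--         return "environmental_compliance"
--     elif any(kw in content_lower for kw in ["quality", "standard", "certification", "inspection", "audit"]):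
--         return "quality_assurance"
--     elif any(kw in content_lower for kw in ["building", "construction", "design", "structural", "code"]):
--         return "building_codes"
--     elif any(kw in content_lower for kw in ["legal", "regulation", "policy", "law", "compliance"]):
--         return "legal_and_regulatory"
--     else:
--         return "general_compliance"
-- ===== SOURCE B (Python) =====
-- _KEYWORD_PRIORITY = {
--     "safety": 0, "hazard": 0, "risk": 0, "protection": 0, "security": 0,
--     "environmental": 1, "sustainability": 1, "emission": 1, "waste": 1, "pollution": 1,
--     "quality": 2, "standard": 2, "certification": 2, "inspection": 2, "audit": 2,
--     "building": 3, "construction": 3, "design": 3, "structural": 3, "code": 3,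
--     "legal": 4, "regulation": 4, "policy": 4, "law": 4, "compliance": 4,
-- }
--
-- _NAMES = ["safety_and_security", "environmental_compliance", "quality_assurance",
--           "building_codes", "legal_and_regulatory"]
--
--
-- def _categorize_standard(content: str) -> str:
--     content_lower = content.lower()
--     matched = [p for kw, p in _KEYWORD_PRIORITY.items() if kw in content_lower]
--     if not matched:
--         return "general_compliance"
--     return _NAMES[min(matched)]
-- ===== Notes on version B (the rewrite author's own statement) =====
-- stated objective: alternative
-- what changed: Replaced the short-circuiting if/elif category chain by a flat keyword-to-priority map: B tests every keyword, collects the priorities of all matches, and returns the name at the minimum priority (default if none matched), instead of returning at the first matching category group.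
import Mathlib
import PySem

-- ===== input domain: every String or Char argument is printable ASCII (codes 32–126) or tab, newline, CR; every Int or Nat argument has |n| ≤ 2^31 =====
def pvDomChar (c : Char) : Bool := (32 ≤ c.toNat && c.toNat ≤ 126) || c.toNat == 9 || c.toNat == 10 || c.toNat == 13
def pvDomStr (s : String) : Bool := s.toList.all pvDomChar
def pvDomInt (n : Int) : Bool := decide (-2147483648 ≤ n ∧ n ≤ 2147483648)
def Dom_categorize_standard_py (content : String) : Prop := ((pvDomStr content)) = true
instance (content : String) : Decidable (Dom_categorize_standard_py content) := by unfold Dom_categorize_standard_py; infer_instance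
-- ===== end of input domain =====

-- B replaces the short-circuiting if/elif chain by a flat keyword→priority map: collect ALL matched priorities, return the name at the minimum (alternative decomposition, same cost); proved equal to A on all inputs.

-- ===== PORT A =====
-- Port of A: lowercase once, then the hard-coded if/elif chain of per-group keyword tests.
def categorize_standard_py (content : String) : String :=
  let cl := PySem.Str.lower content
  if (["safety", "hazard", "risk", "protection", "security"]).any (fun kw => PySem.Str.isIn kw cl) then
    "safety_and_security"
  else if (["environmental", "sustainability", "emission", "waste", "pollution"]).any (fun kw => PySem.Str.isIn kw cl) then
    "environmental_compliance"
  else if (["quality", "standard", "certification", "inspection", "audit"]).any (fun kw => PySem.Str.isIn kw cl) then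
    "quality_assurance"
  else if (["building", "construction", "design", "structural", "code"]).any (fun kw => PySem.Str.isIn kw cl) then
    "building_codes"
  else if (["legal", "regulation", "policy", "law", "compliance"]).any (fun kw => PySem.Str.isIn kw cl) then
    "legal_and_regulatory"
  else
    "general_compliance"

-- ===== PORT B =====
-- B's flat keyword → priority table (a Python dict of distinct keys; items() order = this insertion order).
def pvKw : List (String × Int) :=
  [("safety", 0), ("hazard", 0), ("risk", 0), ("protection", 0), ("security", 0),
   ("environmental", 1), ("sustainability", 1), ("emission", 1), ("waste", 1), ("pollution", 1),
   ("quality", 2), ("standard", 2), ("certification", 2), ("inspection", 2), ("audit", 2),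
   ("building", 3), ("construction", 3), ("design", 3), ("structural", 3), ("code", 3),
   ("legal", 4), ("regulation", 4), ("policy", 4), ("law", 4), ("compliance", 4)]

def pvNames : List String :=
  ["safety_and_security", "environmental_compliance", "quality_assurance",
   "building_codes", "legal_and_regulatory"]

-- B: collect the priorities of ALL matching keywords, then return the name at min(matched).
def categorize_standard_py_alt (content : String) : String :=
  let cl := PySem.Str.lower content
  let matched := (pvKw.filter (fun kv => PySem.Str.isIn kv.1 cl)).map (fun kv => kv.2)
  match PySem.List.min? matched (fun x => x) with
  | none => "general_compliance"
  | some p =>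
    match PySem.List.pyGet? pvNames p with
    | some name => name
    | none => ""   -- unreachable: min(matched) ∈ {0,…,4} = valid indices of _NAMES

-- ===== PRECONDITION & SPEC =====
def Spec_categorize_standard_py (content : String) (out : String) : Prop := out = categorize_standard_py_alt content
instance (content : String) (out : String) : Decidable (Spec_categorize_standard_py content out) := by unfold Spec_categorize_standard_py; infer_instance

-- ===== CLAIM =====
def Claim_equal_categorize_standard_py : Prop := ∀ (content : String), Dom_categorize_standard_py content → Spec_categorize_standard_py content (categorize_standard_py content)

-- ===== LEMMAS AND PROOFS =====

-- min over ints: if m is a member and a lower bound, min? returns exactly m.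
theorem pv_min?_id_eq (l : List Int) (m : Int) (hm : m ∈ l) (hle : ∀ y ∈ l, m ≤ y) :
    PySem.List.min? l (fun x => x) = some m := by
  cases h : PySem.List.min? l (fun x => x) with
  | none =>
    rw [PySem.List.min?_eq_none_iff] at h
    subst h; cases hm
  | some m' =>
    have h1 := PySem.List.min?_mem h
    have h2 := PySem.List.min?_isMin h m hm
    exact congrArg some (le_antisymm h2 (hle m' h1))

-- the matched-priority list of B for a given lowered content
def pvMatched (cl : String) : List Int :=
  (pvKw.filter (fun kv => PySem.Str.isIn kv.1 cl)).map (fun kv => kv.2)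

theorem pv_mem_matched (cl : String) (kw : String) (p : Int)
    (hmem : (kw, p) ∈ pvKw) (ht : PySem.Str.isIn kw cl = true) : p ∈ pvMatched cl :=
  List.mem_map.mpr ⟨(kw, p), List.mem_filter.mpr ⟨hmem, ht⟩, rfl⟩

-- ===== VERDICT =====
theorem categorize_standard_py_spec : Claim_equal_categorize_standard_py := by
  intro content _
  unfold Spec_categorize_standard_py categorize_standard_py categorize_standard_py_alt
  generalize PySem.Str.lower content = cl
  show _ = (match PySem.List.min? (pvMatched cl) (fun x => x) with
    | none => "general_compliance"
    | some p => match PySem.List.pyGet? pvNames p with | some name => name | none => "")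
  by_cases h0 : (["safety", "hazard", "risk", "protection", "security"]).any (fun kw => PySem.Str.isIn kw cl) = true
  · rcases List.any_eq_true.mp h0 with ⟨kw, hkw, ht⟩
    have hm : (0 : Int) ∈ pvMatched cl := by
      fin_cases hkw <;> exact pv_mem_matched cl _ 0 (by simp [pvKw]) ht
    have hle : ∀ y ∈ pvMatched cl, (0 : Int) ≤ y := by
      intro y hy
      rcases List.mem_map.mp hy with ⟨kv, hkv, rfl⟩
      obtain ⟨hmem', hfilt⟩ := List.mem_filter.mp hkv
      unfold pvKw at hmem'
      fin_cases hmem' <;> simp_all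
    rw [if_pos h0, pv_min?_id_eq _ 0 hm hle]
    rfl
  by_cases h1 : (["environmental", "sustainability", "emission", "waste", "pollution"]).any (fun kw => PySem.Str.isIn kw cl) = true
  · rcases List.any_eq_true.mp h1 with ⟨kw, hkw, ht⟩
    have hm : (1 : Int) ∈ pvMatched cl := by
      fin_cases hkw <;> exact pv_mem_matched cl _ 1 (by simp [pvKw]) ht
    have hle : ∀ y ∈ pvMatched cl, (1 : Int) ≤ y := by
      intro y hy
      rcases List.mem_map.mp hy with ⟨kv, hkv, rfl⟩
      obtain ⟨hmem', hfilt⟩ := List.mem_filter.mp hkv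
      unfold pvKw at hmem'
      fin_cases hmem' <;> simp_all
    rw [if_neg h0, if_pos h1, pv_min?_id_eq _ 1 hm hle]
    rfl
  by_cases h2 : (["quality", "standard", "certification", "inspection", "audit"]).any (fun kw => PySem.Str.isIn kw cl) = true
  · rcases List.any_eq_true.mp h2 with ⟨kw, hkw, ht⟩
    have hm : (2 : Int) ∈ pvMatched cl := by
      fin_cases hkw <;> exact pv_mem_matched cl _ 2 (by simp [pvKw]) ht
    have hle : ∀ y ∈ pvMatched cl, (2 : Int) ≤ y := by
      intro y hy
      rcases List.mem_map.mp hy with ⟨kv, hkv, rfl⟩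
      obtain ⟨hmem', hfilt⟩ := List.mem_filter.mp hkv
      unfold pvKw at hmem'
      fin_cases hmem' <;> simp_all
    rw [if_neg h0, if_neg h1, if_pos h2, pv_min?_id_eq _ 2 hm hle]
    rfl
  by_cases h3 : (["building", "construction", "design", "structural", "code"]).any (fun kw => PySem.Str.isIn kw cl) = true
  · rcases List.any_eq_true.mp h3 with ⟨kw, hkw, ht⟩
    have hm : (3 : Int) ∈ pvMatched cl := by
      fin_cases hkw <;> exact pv_mem_matched cl _ 3 (by simp [pvKw]) ht
    have hle : ∀ y ∈ pvMatched cl, (3 : Int) ≤ y := by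
      intro y hy
      rcases List.mem_map.mp hy with ⟨kv, hkv, rfl⟩
      obtain ⟨hmem', hfilt⟩ := List.mem_filter.mp hkv
      unfold pvKw at hmem'
      fin_cases hmem' <;> simp_all
    rw [if_neg h0, if_neg h1, if_neg h2, if_pos h3, pv_min?_id_eq _ 3 hm hle]
    rfl
  by_cases h4 : (["legal", "regulation", "policy", "law", "compliance"]).any (fun kw => PySem.Str.isIn kw cl) = true
  · rcases List.any_eq_true.mp h4 with ⟨kw, hkw, ht⟩
    have hm : (4 : Int) ∈ pvMatched cl := by
      fin_cases hkw <;> exact pv_mem_matched cl _ 4 (by simp [pvKw]) ht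
    have hle : ∀ y ∈ pvMatched cl, (4 : Int) ≤ y := by
      intro y hy
      rcases List.mem_map.mp hy with ⟨kv, hkv, rfl⟩
      obtain ⟨hmem', hfilt⟩ := List.mem_filter.mp hkv
      unfold pvKw at hmem'
      fin_cases hmem' <;> simp_all
    rw [if_neg h0, if_neg h1, if_neg h2, if_neg h3, if_pos h4, pv_min?_id_eq _ 4 hm hle]
    rfl
  · have hnil : pvMatched cl = [] := by
      unfold pvMatched
      rw [List.map_eq_nil_iff, List.filter_eq_nil_iff]
      intro kv hkv
      unfold pvKw at hkv
      fin_cases hkv <;> simp_all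
    rw [if_neg h0, if_neg h1, if_neg h2, if_neg h3, if_neg h4, hnil,
      show PySem.List.min? ([] : List Int) (fun x => x) = none from
        (PySem.List.min?_eq_none_iff _ _).mpr rfl]
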